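-- pv_equiv track=rewrite | github.com/Fengchao-531/ssc_LLM_phishing_survey | Evaluation/evl.py | build_field_order
-- ===== SOURCE A (Python) =====
-- from typing import Dict, Iterable, Iterator, List, MutableMapping, Optional, Sequence, Tuple
--
-- BASE_FIELD_ORDER: Sequence[str] = (
--     "source_dataset",
--     "source_detail",
--     "record_id",
--     "label",
--     "eml_path",
--     "template_key",
--     "From",
--     "Fullname",
--     "To",
--     "Cc",
--     "Bcc",
--     "Reply-To",
--     "Subject",
--     "Date",
--     "Return_Path",
--     "Delivered_to",
--     "Message_Id",
--     "IP",
--     "Content_type",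
--     "Content_Length",
--     "Body",
--     "body_text",
--     "body_html",
--     "Raw_Headers",
--     "Language",
-- )
--
-- def build_field_order(all_fields: Iterable[str]) -> List[str]:
--     result: List[str] = []
--     seen = set()
--     for field in BASE_FIELD_ORDER:
--         if field in all_fields and field not in seen:
--             result.append(field)
--             seen.add(field)
--     for field in sorted(all_fields):
--         if field not in seen:
--             result.append(field)
--             seen.add(field)
--     return result
-- ===== SOURCE B (Python) =====
-- BASE_FIELD_ORDER = (
--     "source_dataset",
--     "source_detail",
--     "record_id",
--     "label",
--     "eml_path",
--     "template_key",
--     "From",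
--     "Fullname",
--     "To",
--     "Cc",
--     "Bcc",
--     "Reply-To",
--     "Subject",
--     "Date",
--     "Return_Path",
--     "Delivered_to",
--     "Message_Id",
--     "IP",
--     "Content_type",
--     "Content_Length",
--     "Body",
--     "body_text",
--     "body_html",
--     "Raw_Headers",
--     "Language",
-- )
--
-- def build_field_order(all_fields):
--     rank = {field: i for i, field in enumerate(BASE_FIELD_ORDER)}
--     n = len(BASE_FIELD_ORDER)
--     return sorted(set(all_fields), key=lambda f: (rank.get(f, n), f))
-- ===== Notes on version B (the rewrite author's own statement) =====
-- stated objective: idiomatic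
-- what changed: Replaces the two explicit passes with a mutable seen-set (scan BASE_FIELD_ORDER with membership probes into all_fields, then a dedup loop over sorted(all_fields)) by one keyed sort: dedup via set(all_fields) and a single sorted() call with the composite key (base_rank_or_len, field).
import Mathlib
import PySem

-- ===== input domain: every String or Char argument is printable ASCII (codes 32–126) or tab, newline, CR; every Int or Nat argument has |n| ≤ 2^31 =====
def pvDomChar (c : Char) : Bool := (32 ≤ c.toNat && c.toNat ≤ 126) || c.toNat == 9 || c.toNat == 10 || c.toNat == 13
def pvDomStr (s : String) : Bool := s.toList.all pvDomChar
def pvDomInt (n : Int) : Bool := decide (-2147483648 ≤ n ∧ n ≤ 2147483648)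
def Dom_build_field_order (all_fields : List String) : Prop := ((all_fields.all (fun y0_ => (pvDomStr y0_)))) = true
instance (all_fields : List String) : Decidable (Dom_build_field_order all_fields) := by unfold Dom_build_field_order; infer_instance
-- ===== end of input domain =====

-- B replaces A's two explicit passes with a seen-set by a single keyed sort over the
-- distinct fields (idiomatic one-sort decomposition); same return value, no speed claim.


-- shared module constant BASE_FIELD_ORDER
def baseFieldOrder : List String :=
  ["source_dataset", "source_detail", "record_id", "label", "eml_path", "template_key",
   "From", "Fullname", "To", "Cc", "Bcc", "Reply-To", "Subject", "Date", "Return_Path",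
   "Delivered_to", "Message_Id", "IP", "Content_type", "Content_Length", "Body",
   "body_text", "body_html", "Raw_Headers", "Language"]

-- ===== PORT A =====
def build_field_order (all_fields : List String) : List String :=
  -- result: List String, seen: set()
  let st1 := baseFieldOrder.foldl
    (fun (st : List String × PySem.Set String) field =>
      if all_fields.contains field && !(PySem.Set.contains st.2 field) then
        (st.1 ++ [field], PySem.Set.add st.2 field)
      else st)
    ([], PySem.Set.empty)
  let st2 := (PySem.List.sorted all_fields (fun x => x)).foldl
    (fun (st : List String × PySem.Set String) field =>
      if !(PySem.Set.contains st.2 field) then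
        (st.1 ++ [field], PySem.Set.add st.2 field)
      else st)
    st1
  st2.1

-- ===== PORT B =====
-- rank = {field: i for i, field in enumerate(BASE_FIELD_ORDER)}
def rankDict : PySem.Dict String Int :=
  (PySem.List.enumerate baseFieldOrder 0).foldl (fun d p => d.insert p.2 p.1) PySem.Dict.empty

def build_field_order_alt (all_fields : List String) : List String :=
  PySem.List.sorted2 (PySem.Set.ofList all_fields)
    (fun f => rankDict.getD f (PySem.List.len baseFieldOrder)) (fun f => f)

-- ===== PRECONDITION & SPEC =====
def Spec_build_field_order (all_fields : List String) (out : List String) : Prop := out = build_field_order_alt all_fields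
instance (all_fields : List String) (out : List String) : Decidable (Spec_build_field_order all_fields out) := by unfold Spec_build_field_order; infer_instance

-- ===== CLAIM (what is proved, stated in full; the proofs are below) =====
def Claim_equal_build_field_order : Prop := ∀ (all_fields : List String), Dom_build_field_order all_fields → Spec_build_field_order all_fields (build_field_order all_fields)

-- ===== LEMMAS AND PROOFS =====

-- the composite sort key of B, read at the Lex order
def pvKey (f : String) : Int ×ₗ String := toLex (rankDict.getD f 25, f)

theorem pv_len_base : PySem.List.len baseFieldOrder = (25 : Int) := by decide

theorem pv_nodup_base : baseFieldOrder.Nodup := by decide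

-- sorted2 with LinearOrder keys is sorted at the lexicographic key
theorem pv_sorted2_eq_sorted_lex {α κ₁ κ₂ : Type} [LinearOrder κ₁] [LinearOrder κ₂]
    (xs : List α) (k1 : α → κ₁) (k2 : α → κ₂) :
    PySem.List.sorted2 xs k1 k2 = PySem.List.sorted xs (fun x => toLex (k1 x, k2 x)) := by
  show List.foldl _ [] xs = _
  rw [PySem.List.sorted_eq_foldl_insertBy]
  have hcomp : (fun (a b : α) => decide (k1 a < k1 b) || (!decide (k1 b < k1 a) && decide (k2 a < k2 b)))
      = fun a b => decide (toLex (k1 a, k2 a) < toLex (k1 b, k2 b)) := by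
    funext a b
    rw [Bool.eq_iff_iff]
    simp only [Bool.or_eq_true, Bool.and_eq_true, Bool.not_eq_eq_eq_not, Bool.not_true,
      decide_eq_true_iff, decide_eq_false_iff_not, Prod.Lex.lt_iff, ofLex_toLex]
    constructor
    · rintro (h | ⟨h1, h2⟩)
      · exact Or.inl h
      · rcases lt_trichotomy (k1 a) (k1 b) with h' | h' | h'
        · exact Or.inl h'
        · exact Or.inr ⟨h', h2⟩
        · exact absurd h' h1
    · rintro (h | ⟨h1, h2⟩)
      · exact Or.inl h
      · exact Or.inr ⟨by rw [h1]; exact lt_irrefl _, h2⟩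
  rw [hcomp]
  rfl

-- A's seen-set loop with an extra condition c is a foldl of Set.add over the filtered list
theorem pv_loop_eq (l : List String) (c : String → Bool) (s : List String) :
    l.foldl
      (fun (st : List String × PySem.Set String) field =>
        if c field && !(PySem.Set.contains st.2 field) then
          (st.1 ++ [field], PySem.Set.add st.2 field)
        else st)
      (s, s)
    = ((l.filter c).foldl PySem.Set.add s, (l.filter c).foldl PySem.Set.add s) := by
  induction l generalizing s with
  | nil => rfl
  | cons f t ih =>
    rw [List.foldl_cons, List.filter_cons]
    show List.foldl _
      (if (c f && !(PySem.Set.contains s f)) = true then (s ++ [f], PySem.Set.add s f)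
       else (s, s)) t = _
    by_cases hc : c f = true
    · by_cases hm : f ∈ s
      · rw [if_neg (by simp [PySem.Set.contains, hc, hm]), if_pos hc, List.foldl_cons,
          show PySem.Set.add s f = s by simp [PySem.Set.add, PySem.Set.contains, hm]]
        exact ih s
      · rw [if_pos (by simp [PySem.Set.contains, hc, hm]), if_pos hc, List.foldl_cons,
          show PySem.Set.add s f = s ++ [f] by simp [PySem.Set.add, PySem.Set.contains, hm]]
        exact ih _
    · rw [if_neg (by simp [hc]), if_neg hc]
      exact ih s

-- folding Set.add into P ++ q appends only the elements not already in P
theorem pv_foldl_add_append (L P q : List String) :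
    L.foldl PySem.Set.add (P ++ q)
      = P ++ (L.filter (fun x => !(P.contains x))).foldl PySem.Set.add q := by
  induction L generalizing q with
  | nil => rfl
  | cons x t ih =>
    rw [List.foldl_cons, List.filter_cons]
    by_cases hp : x ∈ P
    · rw [show PySem.Set.add (P ++ q) x = P ++ q by
          simp [PySem.Set.add, PySem.Set.contains, hp],
        if_neg (by simp [hp])]
      exact ih q
    · by_cases hq : x ∈ q
      · rw [show PySem.Set.add (P ++ q) x = P ++ q by
            simp [PySem.Set.add, PySem.Set.contains, hq],
          if_pos (by simp [hp]), List.foldl_cons,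
          show PySem.Set.add q x = q by simp [PySem.Set.add, PySem.Set.contains, hq]]
        exact ih q
      · rw [show PySem.Set.add (P ++ q) x = P ++ (q ++ [x]) by
            simp [PySem.Set.add, PySem.Set.contains, hp, hq],
          if_pos (by simp [hp]), List.foldl_cons,
          show PySem.Set.add q x = q ++ [x] by simp [PySem.Set.add, PySem.Set.contains, hq]]
        exact ih _

-- A's second loop (no extra condition) is again a foldl of Set.add
theorem pv_loop2_eq (l : List String) (s : List String) :
    l.foldl
      (fun (st : List String × PySem.Set String) field =>
        if !(PySem.Set.contains st.2 field) then
          (st.1 ++ [field], PySem.Set.add st.2 field)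
        else st)
      (s, s)
    = (l.foldl PySem.Set.add s, l.foldl PySem.Set.add s) := by
  induction l generalizing s with
  | nil => rfl
  | cons f t ih =>
    rw [List.foldl_cons, List.foldl_cons]
    show List.foldl _
      (if (!(PySem.Set.contains s f)) = true then (s ++ [f], PySem.Set.add s f)
       else (s, s)) t = _
    by_cases hm : f ∈ s
    · rw [if_neg (by simp [PySem.Set.contains, hm]),
        show PySem.Set.add s f = s by simp [PySem.Set.add, PySem.Set.contains, hm]]
      exact ih s
    · rw [if_pos (by simp [PySem.Set.contains, hm]),
        show PySem.Set.add s f = s ++ [f] by simp [PySem.Set.add, PySem.Set.contains, hm]]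
      exact ih _

-- set(l) keeps a subsequence of l
theorem pv_ofList_sublist {α : Type} [BEq α] [LawfulBEq α] (l : List α) :
    (PySem.Set.ofList l).Sublist l := by
  induction l with
  | nil => simp [PySem.Set.ofList_nil]
  | cons x t ih =>
    rw [PySem.Set.ofList_cons]
    exact List.Sublist.cons₂ x ((List.filter_sublist).trans ih)

-- characterization of A's result
theorem pv_A_char (xs : List String) :
    build_field_order xs
      = baseFieldOrder.filter (fun f => xs.contains f)
        ++ PySem.Set.ofList
             ((PySem.List.sorted xs (fun x => x)).filter
               (fun x => !((baseFieldOrder.filter (fun f => xs.contains f)).contains x))) := by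
  unfold build_field_order
  have h1 := pv_loop_eq baseFieldOrder (fun f => xs.contains f) []
  have hP : (baseFieldOrder.filter (fun f => xs.contains f)).foldl PySem.Set.add []
      = baseFieldOrder.filter (fun f => xs.contains f) := by
    rw [← PySem.Set.ofList_eq_foldl]
    exact PySem.Set.ofList_eq_self_of_nodup _ (pv_nodup_base.filter _)
  show (List.foldl _ (List.foldl _ ([], PySem.Set.empty) baseFieldOrder)
      (PySem.List.sorted xs (fun x => x))).1 = _
  rw [show (([], PySem.Set.empty) : List String × PySem.Set String)
      = (([] : List String), ([] : List String)) from rfl, h1, hP, pv_loop2_eq,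
      ← List.append_nil (baseFieldOrder.filter (fun f => xs.contains f)),
      pv_foldl_add_append, List.append_nil, ← PySem.Set.ofList_eq_foldl]

theorem pv_rank_base_pairwise :
    baseFieldOrder.Pairwise (fun a b => rankDict.getD a 25 < rankDict.getD b 25) := by decide

theorem pv_rank_base_lt : ∀ a ∈ baseFieldOrder, rankDict.getD a 25 < 25 := by decide

theorem pv_keys_rank : rankDict.keys = baseFieldOrder := by decide

theorem pv_rank_notbase (a : String) (h : a ∉ baseFieldOrder) : rankDict.getD a 25 = 25 := by
  apply PySem.Dict.getD_of_not_contains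
  cases hb : rankDict.contains a with
  | false => rfl
  | true => exact absurd (pv_keys_rank ▸ (PySem.Dict.contains_iff_mem_keys rankDict a).mp hb) h

theorem pv_perm (xs : List String) :
    (baseFieldOrder.filter (fun f => xs.contains f)
      ++ PySem.Set.ofList
           ((PySem.List.sorted xs (fun x => x)).filter
             (fun x => !((baseFieldOrder.filter (fun f => xs.contains f)).contains x)))).Perm
      (PySem.Set.ofList xs) := by
  refine (List.perm_ext_iff_of_nodup ?_ (PySem.Set.nodup_ofList xs)).mpr ?_
  · rw [List.nodup_append]
    refine ⟨pv_nodup_base.filter _, PySem.Set.nodup_ofList _, ?_⟩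
    intro a ha b hb hab
    rw [PySem.Set.mem_ofList, List.mem_filter] at hb
    have := hb.2
    simp only [Bool.not_eq_eq_eq_not, Bool.not_true, Bool.eq_false_iff, Ne,
      List.contains_iff_mem] at this
    exact this (hab ▸ ha)
  · intro a
    simp only [List.mem_append, List.mem_filter, PySem.Set.mem_ofList,
      PySem.List.mem_sorted, Bool.not_eq_eq_eq_not, Bool.not_true, Bool.eq_false_iff, Ne,
      List.contains_iff_mem]
    constructor
    · rintro (⟨_, h⟩ | ⟨h, _⟩) <;> exact h
    · intro ha
      by_cases hb : a ∈ baseFieldOrder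
      · exact Or.inl ⟨hb, ha⟩
      · exact Or.inr ⟨ha, fun h => hb h.1⟩

theorem pv_pairwise (xs : List String) :
    (baseFieldOrder.filter (fun f => xs.contains f)
      ++ PySem.Set.ofList
           ((PySem.List.sorted xs (fun x => x)).filter
             (fun x => !((baseFieldOrder.filter (fun f => xs.contains f)).contains x)))).Pairwise
      (fun a b => pvKey a < pvKey b) := by
  have hnotbase : ∀ b ∈ PySem.Set.ofList
      ((PySem.List.sorted xs (fun x => x)).filter
        (fun x => !((baseFieldOrder.filter (fun f => xs.contains f)).contains x))),
      b ∉ baseFieldOrder := by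
    intro b hb hbase
    rw [PySem.Set.mem_ofList, List.mem_filter] at hb
    have hxs : b ∈ xs := (PySem.List.mem_sorted xs (fun x => x) false b).mp hb.1
    have := hb.2
    simp only [Bool.not_eq_eq_eq_not, Bool.not_true, Bool.eq_false_iff, Ne,
      List.contains_iff_mem] at this
    exact this (List.mem_filter.mpr ⟨hbase, List.contains_iff_mem.mpr hxs⟩)
  rw [List.pairwise_append]
  refine ⟨?_, ?_, ?_⟩
  · exact (pv_rank_base_pairwise.sublist List.filter_sublist).imp
      (fun h => Prod.Lex.lt_iff.mpr (Or.inl h))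
  · have hle : (PySem.Set.ofList
        ((PySem.List.sorted xs (fun x => x)).filter
          (fun x => !((baseFieldOrder.filter (fun f => xs.contains f)).contains x)))).Pairwise
        (fun a b : String => a ≤ b) := by
      refine List.Pairwise.sublist ((pv_ofList_sublist
        ((PySem.List.sorted xs (fun x => x)).filter
          (fun x => !((baseFieldOrder.filter (fun f => xs.contains f)).contains x)))).trans
        List.filter_sublist) ?_
      exact (PySem.List.sorted_pairwise xs (fun x => x)).imp (fun h => h)
    have hne : (PySem.Set.ofList
        ((PySem.List.sorted xs (fun x => x)).filter
          (fun x => !((baseFieldOrder.filter (fun f => xs.contains f)).contains x)))).Pairwise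
        (fun a b : String => a ≠ b) := PySem.Set.nodup_ofList _
    refine (hle.and hne).imp_of_mem ?_
    intro a b ha hb h
    have hlt : a < b := lt_of_le_of_ne h.1 h.2
    exact Prod.Lex.lt_iff.mpr (Or.inr ⟨by
      show rankDict.getD a 25 = rankDict.getD b 25
      rw [pv_rank_notbase a (hnotbase a ha), pv_rank_notbase b (hnotbase b hb)], hlt⟩)
  · intro a ha b hb
    have haB : a ∈ baseFieldOrder := (List.mem_filter.mp ha).1
    have hbr : rankDict.getD b 25 = 25 := pv_rank_notbase b (hnotbase b hb)
    exact Prod.Lex.lt_iff.mpr (Or.inl (by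
      show rankDict.getD a 25 < rankDict.getD b 25
      rw [hbr]; exact pv_rank_base_lt a haB))

-- ===== VERDICT (by name: the statement is the Claim_ definition above) =====
theorem build_field_order_spec : Claim_equal_build_field_order := by
  intro xs _
  unfold Spec_build_field_order build_field_order_alt
  rw [pv_sorted2_eq_sorted_lex, pv_len_base,
    show (fun x => toLex (rankDict.getD x 25, x)) = pvKey from rfl,
    PySem.List.sorted_eq_of_perm_of_pairwise_lt _ _ pvKey (pv_perm xs) (pv_pairwise xs)]
  exact pv_A_char xs
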